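-- pv_equiv track=rewrite | github.com/pypi-data/pypi-mirror-283 | packages/colemen-string-utils/colemen_string_utils-0.0.0-py3-none-any.whl/colemen_string_utils/string_escaping.py | reverse_sanitize_quotes
-- ===== SOURCE A (Python) =====
-- def reverse_sanitize_quotes(string):
--     orig_list = False
--     if isinstance(string, (list)):
--         orig_list = True
--     if isinstance(string, (str)):
--         string = [string]
--
--     new_list = []
--     for item in string:
--         item = item.replace("&apos_", "'")
--         item = item.replace("&quot_", '"')
--         new_list.append(item)
--
--     if len(new_list) == 1 and orig_list is False:
--         return new_list[0]
--
--     return new_list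
-- ===== SOURCE B (Python) =====
-- def reverse_sanitize_quotes(string):
--     # Single left-to-right scan replacing both escape tokens in one pass
--     # (instead of two sequential .replace scans). Same list/str wrapper logic.
--     orig_list = False
--     if isinstance(string, (list)):
--         orig_list = True
--     if isinstance(string, (str)):
--         string = [string]
--
--     new_list = []
--     for item in string:
--         out = []
--         i = 0
--         n = len(item)
--         while i < n:
--             tok = item[i:i + 6]
--             if tok == "&apos_":
--                 out.append("'")
--                 i += 6
--             elif tok == "&quot_":
--                 out.append('"')
--                 i += 6
--             else:
--                 out.append(item[i])
--                 i += 1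
--         new_list.append("".join(out))
--
--     if len(new_list) == 1 and orig_list is False:
--         return new_list[0]
--
--     return new_list
-- ===== Notes on version B (the rewrite author's own statement) =====
-- stated objective: alternative
-- what changed: Replaces the two sequential str.replace passes with a single left-to-right scan that dispatches on which escape token starts at the current position, replacing both tokens in one pass.
import Mathlib
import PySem

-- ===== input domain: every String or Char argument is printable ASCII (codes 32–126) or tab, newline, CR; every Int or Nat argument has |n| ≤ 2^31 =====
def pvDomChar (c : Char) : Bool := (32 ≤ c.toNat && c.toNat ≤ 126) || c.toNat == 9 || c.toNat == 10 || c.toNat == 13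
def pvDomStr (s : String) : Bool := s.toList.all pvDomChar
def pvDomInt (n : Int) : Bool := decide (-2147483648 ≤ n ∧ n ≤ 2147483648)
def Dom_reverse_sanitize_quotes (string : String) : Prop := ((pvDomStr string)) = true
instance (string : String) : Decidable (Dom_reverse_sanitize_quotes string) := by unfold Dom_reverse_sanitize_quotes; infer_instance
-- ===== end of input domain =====

-- B replaces A's two sequential .replace passes by one left-to-right scan dispatching
-- on which escape token starts at the current position (alternative, same cost).
-- ===== PORT A =====
-- A wraps a str argument into a one-element list, runs two sequential .replace
-- passes on the single item, and (len==1, not a list originally) returns that item: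
-- for a String argument this is exactly the two chained replaces.
def reverse_sanitize_quotes (string : String) : String :=
  PySem.Str.replace (PySem.Str.replace string "&apos_" "'") "&quot_" "\""

-- ===== PORT B =====
-- Source B's single left-to-right scan: item[i:i+6] == tok is the prefix test on the
-- remaining characters; out.append/''.join is building the result list.
def pvScanGo : List Char → List Char
  | [] => []
  | c :: t =>
    if List.isPrefixOf "&apos_".toList (c :: t) then '\'' :: pvScanGo (t.drop 5)
    else if List.isPrefixOf "&quot_".toList (c :: t) then '"' :: pvScanGo (t.drop 5)
    else c :: pvScanGo t
termination_by l => l.length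
decreasing_by all_goals simp

def reverse_sanitize_quotes_alt (string : String) : String :=
  String.ofList (pvScanGo string.toList)

-- ===== PRECONDITION & SPEC =====
def Spec_reverse_sanitize_quotes (string : String) (out : String) : Prop := out = reverse_sanitize_quotes_alt string
instance (string : String) (out : String) : Decidable (Spec_reverse_sanitize_quotes string out) := by unfold Spec_reverse_sanitize_quotes; infer_instance

-- ===== CLAIM (what is proved, stated in full; the proofs are below) =====
def Claim_equal_reverse_sanitize_quotes : Prop := ∀ (string : String), Dom_reverse_sanitize_quotes string → Spec_reverse_sanitize_quotes string (reverse_sanitize_quotes string)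

-- ===== LEMMAS AND PROOFS =====

-- pvRep: a clean structural characterisation of PySem.Chars.replace for a nonempty pattern
def pvRep (old new : List Char) : List Char → List Char
  | [] => []
  | c :: t => if List.isPrefixOf old (c :: t) then new ++ pvRep old new (t.drop (old.length - 1))
              else c :: pvRep old new t
termination_by l => l.length
decreasing_by all_goals (simp; try omega)

theorem pvGo_eq (old new : List Char) (hold : old ≠ []) :
    ∀ (fuel : Nat) (l acc : List Char), l.length ≤ fuel →
      PySem.Chars.replace.go old new fuel l acc = acc.reverse ++ pvRep old new l := by
  intro fuel
  induction fuel with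
  | zero =>
    intro l acc h
    have : l = [] := List.eq_nil_of_length_eq_zero (Nat.le_zero.mp h)
    subst this
    simp [PySem.Chars.replace.go, pvRep]
  | succ n ih =>
    intro l acc h
    cases l with
    | nil => simp [PySem.Chars.replace.go, pvRep]
    | cons c t =>
      rw [PySem.Chars.replace.go]
      by_cases hp : List.isPrefixOf old (c :: t)
      · rw [if_pos hp]
        obtain ⟨k, hk⟩ : ∃ k, old.length = k + 1 := by
          cases old with | nil => exact absurd rfl hold | cons a b => exact ⟨b.length, rfl⟩
        have hdrop : List.drop old.length (c :: t) = t.drop (old.length - 1) := by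
          rw [hk]; simp
        rw [hdrop, ih _ _ (by simp at h ⊢; omega)]
        rw [pvRep, if_pos hp]
        simp
      · rw [if_neg hp, ih _ _ (by simp at h; omega)]
        rw [pvRep, if_neg hp]
        simp

theorem pvReplace_eq (s old new : List Char) (hold : old ≠ []) :
    PySem.Chars.replace s old new = pvRep old new s := by
  unfold PySem.Chars.replace
  rw [if_neg (by simpa using hold)]
  simpa using pvGo_eq old new hold s.length s [] le_rfl

theorem pvApos_toList : "&apos_".toList = ['&', 'a', 'p', 'o', 's', '_'] := rfl
theorem pvQuot_toList : "&quot_".toList = ['&', 'q', 'u', 'o', 't', '_'] := rfl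

theorem pvPref_transfer (t : List Char) : ∀ (p : List Char), '&' ∉ p → '\'' ∉ p →
    List.isPrefixOf p (pvRep "&apos_".toList ['\''] t) = List.isPrefixOf p t := by
  induction t using pvRep.induct (old := "&apos_".toList) with
  | case1 =>
    intro p _ _
    rw [pvRep]
  | case2 c t hp ih =>
    intro p hamp hq
    rw [pvRep, if_pos hp]
    have hc : c = '&' := by
      rw [pvApos_toList] at hp
      simp [List.isPrefixOf] at hp
      exact hp.1.symm
    subst hc
    cases p with
    | nil => rfl
    | cons a p' =>
      have ha : a ≠ '&' := fun h => hamp (h ▸ List.mem_cons_self ..)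
      have ha' : a ≠ '\'' := fun h => hq (h ▸ List.mem_cons_self ..)
      simp only [List.singleton_append, List.isPrefixOf, beq_eq_false_iff_ne.mpr ha, beq_eq_false_iff_ne.mpr ha',
        Bool.false_and]
  | case3 c t hp ih =>
    intro p hamp hq
    rw [pvRep, if_neg hp]
    cases p with
    | nil => rfl
    | cons a p' =>
      simp only [List.isPrefixOf]
      rw [ih p' (fun h => hamp (List.mem_cons_of_mem _ h)) (fun h => hq (List.mem_cons_of_mem _ h))]

theorem pvMain (s : List Char) :
    pvRep "&quot_".toList ['"'] (pvRep "&apos_".toList ['\''] s) = pvScanGo s := by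
  induction s using pvScanGo.induct with
  | case1 => rw [pvScanGo, pvRep, pvRep]
  | case2 c t hp1 ih =>
    rw [pvScanGo, if_pos hp1, pvRep, if_pos hp1]
    have : ("&apos_".toList.length - 1) = 5 := rfl
    rw [this]
    rw [List.singleton_append, pvRep, if_neg (by rw [pvQuot_toList]; simp [List.isPrefixOf])]
    rw [ih]
  | case3 c t hp1 hp2 ih =>
    rw [pvScanGo, if_neg hp1, if_pos hp2]
    obtain ⟨t', ht⟩ := List.isPrefixOf_iff_prefix.mp hp2
    rw [pvQuot_toList] at ht
    simp only [List.cons_append, List.nil_append] at ht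
    injection ht with hc ht
    subst hc ht
    simp only [List.drop_succ_cons, List.drop_zero]
    have e1 : pvRep "&apos_".toList ['\''] ('&'::'q'::'u'::'o'::'t'::'_'::t')
        = '&'::'q'::'u'::'o'::'t'::'_':: pvRep "&apos_".toList ['\''] t' := by
      rw [pvRep, if_neg (by rw [pvApos_toList]; simp [List.isPrefixOf])]
      rw [pvRep, if_neg (by rw [pvApos_toList]; simp [List.isPrefixOf])]
      rw [pvRep, if_neg (by rw [pvApos_toList]; simp [List.isPrefixOf])]
      rw [pvRep, if_neg (by rw [pvApos_toList]; simp [List.isPrefixOf])]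
      rw [pvRep, if_neg (by rw [pvApos_toList]; simp [List.isPrefixOf])]
      rw [pvRep, if_neg (by rw [pvApos_toList]; simp [List.isPrefixOf])]
    rw [e1, pvRep, if_pos (by rw [pvQuot_toList]; simp [List.isPrefixOf])]
    have e2 : ("&quot_".toList.length - 1) = 5 := rfl
    rw [e2]
    simp only [List.drop_succ_cons, List.drop_zero, List.singleton_append]
    simp only [List.drop_succ_cons, List.drop_zero] at ih
    rw [ih]
  | case4 c t hp1 hp2 ih =>
    rw [pvScanGo, if_neg hp1, if_neg hp2]
    rw [pvRep, if_neg hp1]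
    rw [pvRep, if_neg ?hq]
    · rw [ih]
    case hq =>
      intro hcontra
      rw [pvQuot_toList, List.isPrefixOf] at hcontra
      simp only [Bool.and_eq_true, beq_iff_eq] at hcontra
      obtain ⟨hc, hrest⟩ := hcontra
      rw [pvPref_transfer t ['q','u','o','t','_'] (by decide) (by decide)] at hrest
      apply hp2
      rw [pvQuot_toList, List.isPrefixOf]
      simp only [Bool.and_eq_true, beq_iff_eq]
      exact ⟨hc, hrest⟩


-- ===== VERDICT (by name: the statement is the Claim_ definition above) =====
theorem reverse_sanitize_quotes_spec : Claim_equal_reverse_sanitize_quotes := by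
  intro s _
  unfold Spec_reverse_sanitize_quotes reverse_sanitize_quotes reverse_sanitize_quotes_alt
  unfold PySem.Str.replace
  rw [String.toList_ofList]
  rw [pvReplace_eq _ _ _ (by decide), pvReplace_eq _ _ _ (by decide)]
  rw [show "'".toList = ['\''] from rfl, show "\"".toList = ['"'] from rfl, pvMain]
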